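-- pv_equiv track=rewrite | github.com/naver/pasero | pasero/preprocessing.py | mask_padding
-- ===== SOURCE A (Python) =====
-- from typing import Optional, Sequence, Iterable, Iterator
--
-- def mask_padding(ids: Sequence[int], eos_idx: int, padding_idx: int) -> list[int]:
--     """ Return a mask with ones at padding token positions """
--     mask = []
--     for token_id in ids:
--         if token_id == padding_idx:
--             mask.append(1)
--         else:
--             mask.append(0)
--         if token_id == eos_idx:
--             break
--     return mask + (len(ids) - len(mask)) * [1]
-- ===== SOURCE B (Python) =====
-- def mask_padding(ids, eos_idx, padding_idx):
--     """ Return a mask with ones at padding token positions """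
--     ids = list(ids)
--     mask = [1 if t == padding_idx else 0 for t in ids]
--     if eos_idx in ids:
--         p = ids.index(eos_idx)
--         mask[p + 1:] = [1] * (len(ids) - p - 1)
--     return mask
-- ===== Notes on version B (the rewrite author's own statement) =====
-- stated objective: alternative
-- what changed: Replaces the single early-breaking loop + pad-with-ones tail by two shaped passes: a comprehension mapping every token to its padding bit, then locating the first eos with list.index and overwriting the tail after it by slice assignment.
import Mathlib
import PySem

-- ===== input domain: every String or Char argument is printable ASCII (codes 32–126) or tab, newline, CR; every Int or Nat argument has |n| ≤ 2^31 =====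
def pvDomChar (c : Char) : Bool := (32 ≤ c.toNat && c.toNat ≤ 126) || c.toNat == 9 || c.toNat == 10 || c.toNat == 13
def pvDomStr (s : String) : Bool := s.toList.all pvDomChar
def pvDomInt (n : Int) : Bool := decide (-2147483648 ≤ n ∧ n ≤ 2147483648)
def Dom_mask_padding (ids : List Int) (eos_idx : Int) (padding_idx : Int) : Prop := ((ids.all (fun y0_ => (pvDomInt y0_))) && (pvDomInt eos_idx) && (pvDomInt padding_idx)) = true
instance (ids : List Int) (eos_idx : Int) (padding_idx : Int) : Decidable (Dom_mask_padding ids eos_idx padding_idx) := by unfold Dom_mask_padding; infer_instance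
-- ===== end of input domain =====

-- B replaces A's early-breaking loop by a map over all tokens plus a tail overwrite after the
-- first eos located with list.index (objective: alternative decomposition; same cost).

-- ===== PORT A =====
-- the for-loop with its break: appends the padding bit per token, stops after the eos token
def maskLoopA (ids : List Int) (eos_idx : Int) (padding_idx : Int) : List Int :=
  match ids with
  | [] => []
  | t :: rest =>
    let m : Int := if t = padding_idx then 1 else 0
    if t = eos_idx then [m] else m :: maskLoopA rest eos_idx padding_idx

def mask_padding (ids : List Int) (eos_idx : Int) (padding_idx : Int) : List Int :=
  let mask := maskLoopA ids eos_idx padding_idx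
  mask ++ List.replicate (ids.length - mask.length) 1

-- ===== PORT B =====
def mask_padding_alt (ids : List Int) (eos_idx : Int) (padding_idx : Int) : List Int :=
  let mask := ids.map (fun t => if t = padding_idx then (1 : Int) else 0)
  match PySem.List.index? ids eos_idx with
  | none => mask
  | some p => mask.take (p + 1) ++ List.replicate (ids.length - (p + 1)) 1

-- ===== PRECONDITION & SPEC =====
def Spec_mask_padding (ids : List Int) (eos_idx : Int) (padding_idx : Int) (out : List Int) : Prop := out = mask_padding_alt ids eos_idx padding_idx
instance (ids : List Int) (eos_idx : Int) (padding_idx : Int) (out : List Int) : Decidable (Spec_mask_padding ids eos_idx padding_idx out) := by unfold Spec_mask_padding; infer_instance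

-- ===== CLAIM (what is proved, stated in full; the proofs are below) =====
def Claim_equal_mask_padding : Prop := ∀ (ids : List Int) (eos_idx : Int) (padding_idx : Int), Dom_mask_padding ids eos_idx padding_idx → Spec_mask_padding ids eos_idx padding_idx (mask_padding ids eos_idx padding_idx)

-- ===== LEMMAS AND PROOFS =====
theorem mask_padding_eq (ids : List Int) (eos_idx : Int) (padding_idx : Int) :
    mask_padding ids eos_idx padding_idx = mask_padding_alt ids eos_idx padding_idx := by
  induction ids with
  | nil => rfl
  | cons t rest ih =>
    by_cases he : t = eos_idx
    · simp [mask_padding, mask_padding_alt, maskLoopA, he, List.idxOf?_cons]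
    · have h1 := PySem.List.index?_cons_of_ne (x := t) (v := eos_idx) rest he
      simp only [mask_padding, mask_padding_alt, maskLoopA, if_neg he, h1,
        List.length_cons, List.map_cons, List.cons_append] at ih ⊢
      cases hidx : PySem.List.index? rest eos_idx with
      | none =>
        simp only [hidx, Option.map_none] at ih ⊢
        have hl : rest.length + 1 - ((maskLoopA rest eos_idx padding_idx).length + 1)
            = rest.length - (maskLoopA rest eos_idx padding_idx).length := by omega
        rw [hl]
        exact congrArg _ ih
      | some p =>
        simp only [hidx, Option.map_some, List.take_succ_cons, List.cons_append] at ih ⊢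
        have hl : rest.length + 1 - ((maskLoopA rest eos_idx padding_idx).length + 1)
            = rest.length - (maskLoopA rest eos_idx padding_idx).length := by omega
        have hp : rest.length + 1 - (p + 1 + 1) = rest.length - (p + 1) := by omega
        rw [hl, hp]
        exact congrArg _ ih

-- ===== VERDICT (by name: the statement is the Claim_ definition above) =====
theorem mask_padding_spec : Claim_equal_mask_padding := by
  intro ids eos_idx padding_idx _
  exact mask_padding_eq ids eos_idx padding_idx
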